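-- pv_equiv track=rewrite | github.com/Vishwa-0502/AI_Diagnosis | app.py | _get_imaging_recommendation
-- ===== SOURCE A (Python) =====
-- def _get_imaging_recommendation(patient_data):
--     """Get specific imaging recommendation based on patient data"""
--
--     symptom_locations = patient_data.get('symptom_locations', [])
--     primary_complaint = patient_data.get('primary_complaint', [])
--
--     if any(loc in ['chest'] for loc in symptom_locations) or 'cardiovascular' in primary_complaint or 'respiratory' in primary_complaint:
--         return "Based on your chest/respiratory symptoms and medical guidelines, I recommend uploading a chest X-ray for comprehensive analysis."
--
--     elif any(loc in ['head'] for loc in symptom_locations) or 'neurological' in primary_complaint: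
--         return "Based on your neurological symptoms and clinical guidelines, I recommend uploading a brain MRI or CT scan for analysis."
--
--     elif any(loc in ['abdomen'] for loc in symptom_locations) or 'gastrointestinal' in primary_complaint:
--         return "Based on your abdominal symptoms, I recommend uploading an abdominal CT scan or ultrasound for analysis."
--
--     elif any(loc in ['extremities', 'back'] for loc in symptom_locations):
--         return "Based on your musculoskeletal symptoms, I recommend uploading an X-ray of the affected area for analysis."
--
--     else:
--         return "Based on your symptoms and medical guidelines, I recommend uploading relevant medical imaging for comprehensive diagnosis."
-- ===== SOURCE B (Python) =====
-- # B: instead of an ordered first-match rule chain, compute a numeric priority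
-- # score (minimum matched category index) in one pass over the symptoms, then
-- # index into a message table.  Priorities mirror the guideline ordering.
--
-- _LOC_PRIORITY = {"chest": 0, "head": 1, "abdomen": 2, "extremities": 3, "back": 3}
-- _COMPLAINT_PRIORITY = {"cardiovascular": 0, "respiratory": 0, "neurological": 1, "gastrointestinal": 2}
--
-- _MESSAGES = [
--     "Based on your chest/respiratory symptoms and medical guidelines, I recommend uploading a chest X-ray for comprehensive analysis.",
--     "Based on your neurological symptoms and clinical guidelines, I recommend uploading a brain MRI or CT scan for analysis.",
--     "Based on your abdominal symptoms, I recommend uploading an abdominal CT scan or ultrasound for analysis.",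
--     "Based on your musculoskeletal symptoms, I recommend uploading an X-ray of the affected area for analysis.",
--     "Based on your symptoms and medical guidelines, I recommend uploading relevant medical imaging for comprehensive diagnosis.",
-- ]
--
--
-- def _get_imaging_recommendation(patient_data):
--     symptom_locations = patient_data.get('symptom_locations', [])
--     primary_complaint = patient_data.get('primary_complaint', [])
--     best = 4
--     for loc in symptom_locations:
--         best = min(best, _LOC_PRIORITY.get(loc, 4))
--     for key, prio in _COMPLAINT_PRIORITY.items():
--         if key in primary_complaint:
--             best = min(best, prio)
--     return _MESSAGES[best]
-- ===== Notes on version B (the rewrite author's own statement) =====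
-- stated objective: alternative
-- what changed: Replaced the first-match if/elif chain by a numeric scoring algorithm: each keyword is mapped to a priority, one pass computes the minimum matched priority, and the answer is the message table indexed by that score.
import Mathlib
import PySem

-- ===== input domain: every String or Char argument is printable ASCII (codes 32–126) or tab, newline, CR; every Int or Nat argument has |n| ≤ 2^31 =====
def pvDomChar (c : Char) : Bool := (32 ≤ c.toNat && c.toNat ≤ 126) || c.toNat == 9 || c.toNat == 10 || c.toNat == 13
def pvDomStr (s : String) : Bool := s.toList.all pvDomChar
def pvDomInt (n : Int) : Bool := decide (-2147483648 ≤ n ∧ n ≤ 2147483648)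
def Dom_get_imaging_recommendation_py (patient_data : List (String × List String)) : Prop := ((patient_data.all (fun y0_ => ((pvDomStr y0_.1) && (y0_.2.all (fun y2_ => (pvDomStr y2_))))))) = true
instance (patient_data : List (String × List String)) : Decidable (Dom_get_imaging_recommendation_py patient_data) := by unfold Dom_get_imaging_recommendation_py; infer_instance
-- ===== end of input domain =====

-- B replaces the first-match if/elif chain by a min-priority score over keyword→priority maps, indexing a message table (objective: alternative).


-- ===== PORT A =====
def get_imaging_recommendation_py (patient_data : List (String × List String)) : String :=
  let symptom_locations := PySem.Dict.getD (PySem.Dict.mk patient_data) "symptom_locations" []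
  let primary_complaint := PySem.Dict.getD (PySem.Dict.mk patient_data) "primary_complaint" []
  if symptom_locations.any (fun loc => ["chest"].contains loc) || primary_complaint.contains "cardiovascular" || primary_complaint.contains "respiratory" then
    "Based on your chest/respiratory symptoms and medical guidelines, I recommend uploading a chest X-ray for comprehensive analysis."
  else if symptom_locations.any (fun loc => ["head"].contains loc) || primary_complaint.contains "neurological" then
    "Based on your neurological symptoms and clinical guidelines, I recommend uploading a brain MRI or CT scan for analysis."
  else if symptom_locations.any (fun loc => ["abdomen"].contains loc) || primary_complaint.contains "gastrointestinal" then
    "Based on your abdominal symptoms, I recommend uploading an abdominal CT scan or ultrasound for analysis."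
  else if symptom_locations.any (fun loc => ["extremities", "back"].contains loc) then
    "Based on your musculoskeletal symptoms, I recommend uploading an X-ray of the affected area for analysis."
  else
    "Based on your symptoms and medical guidelines, I recommend uploading relevant medical imaging for comprehensive diagnosis."

-- ===== PORT B =====
-- keyword → priority maps (mirror Source B's dicts; .get(loc, 4) ported as pvLocPriority)
def pvLocPriority (loc : String) : Nat :=
  if loc = "chest" then 0 else if loc = "head" then 1 else if loc = "abdomen" then 2
  else if loc = "extremities" then 3 else if loc = "back" then 3 else 4

def pvComplaintPriority : List (String × Nat) :=
  [("cardiovascular", 0), ("respiratory", 0), ("neurological", 1), ("gastrointestinal", 2)]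

def pvMessages : List String :=
  [ "Based on your chest/respiratory symptoms and medical guidelines, I recommend uploading a chest X-ray for comprehensive analysis.",
    "Based on your neurological symptoms and clinical guidelines, I recommend uploading a brain MRI or CT scan for analysis.",
    "Based on your abdominal symptoms, I recommend uploading an abdominal CT scan or ultrasound for analysis.",
    "Based on your musculoskeletal symptoms, I recommend uploading an X-ray of the affected area for analysis.",
    "Based on your symptoms and medical guidelines, I recommend uploading relevant medical imaging for comprehensive diagnosis." ]

def get_imaging_recommendation_py_alt (patient_data : List (String × List String)) : String :=
  let symptom_locations := PySem.Dict.getD (PySem.Dict.mk patient_data) "symptom_locations" []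
  let primary_complaint := PySem.Dict.getD (PySem.Dict.mk patient_data) "primary_complaint" []
  let best1 := symptom_locations.foldl (fun b loc => min b (pvLocPriority loc)) 4
  let best2 := pvComplaintPriority.foldl
    (fun b kp => if primary_complaint.contains kp.1 then min b kp.2 else b) best1
  pvMessages.getD best2 ""   -- in-range index, Python _MESSAGES[best]

-- ===== PRECONDITION & SPEC =====
def Spec_get_imaging_recommendation_py (patient_data : List (String × List String)) (out : String) : Prop := out = get_imaging_recommendation_py_alt patient_data
instance (patient_data : List (String × List String)) (out : String) : Decidable (Spec_get_imaging_recommendation_py patient_data out) := by unfold Spec_get_imaging_recommendation_py; infer_instance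

-- ===== CLAIM =====
def Claim_equal_get_imaging_recommendation_py : Prop := ∀ (patient_data : List (String × List String)), Dom_get_imaging_recommendation_py patient_data → Spec_get_imaging_recommendation_py patient_data (get_imaging_recommendation_py patient_data)

-- ===== LEMMAS AND PROOFS =====

-- foldl of min equals min of init with the foldr-minimum
theorem pv_foldl_min (g : String → Nat) : ∀ (xs : List String) (b : Nat), b ≤ 4 →
    xs.foldl (fun b l => min b (g l)) b = min b (xs.foldr (fun l a => min (g l) a) 4)
  | [], b, hb => by simp; omega
  | x :: xs, b, hb => by
    simp [List.foldl_cons, List.foldr_cons,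
      pv_foldl_min g xs (min b (g x)) (le_trans (Nat.min_le_left _ _) hb), Nat.min_assoc]

-- the foldr-minimum of location priorities equals the ordered contains-chain
theorem pv_locmin_chain : ∀ (xs : List String),
    xs.foldr (fun l a => min (pvLocPriority l) a) 4 =
      (if xs.contains "chest" then 0 else if xs.contains "head" then 1
       else if xs.contains "abdomen" then 2
       else if xs.contains "extremities" || xs.contains "back" then 3 else 4)
  | [] => by simp
  | x :: xs => by
    rw [List.foldr_cons, pv_locmin_chain xs]
    by_cases h1 : "chest" = x <;> by_cases h2 : "head" = x <;> by_cases h3 : "abdomen" = x <;>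
      by_cases h4 : "extremities" = x <;> by_cases h5 : "back" = x <;>
      simp_all [pvLocPriority] <;> split_ifs <;> first | omega | (exfalso; simp_all)

-- A's `any (loc in [t])` tests equal the corresponding `contains`
theorem pv_any_eq_mem (a : String) : ∀ (xs : List String),
    (xs.any fun loc => decide (a = loc)) = decide (a ∈ xs)
  | [] => by simp
  | x :: xs => by simp [List.any_cons, pv_any_eq_mem a xs]

theorem pv_any_singleton (a : String) : ∀ (xs : List String),
    (xs.any fun loc => [a].contains loc) = xs.contains a
  | [] => rfl
  | x :: xs => by
    simp [List.any_cons, eq_comm]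
    rw [pv_any_eq_mem]

theorem pv_any2 (a b : String) : ∀ (xs : List String),
    (xs.any fun loc => decide (a = loc) || decide (b = loc)) = (decide (a ∈ xs) || decide (b ∈ xs))
  | [] => by simp
  | x :: xs => by
    simp [List.any_cons, pv_any2 a b xs]
    ac_rfl

theorem pv_any_pair (a b : String) : ∀ (xs : List String),
    (xs.any fun loc => [a, b].contains loc) = (xs.contains a || xs.contains b)
  | [] => rfl
  | x :: xs => by
    simp [List.any_cons, eq_comm]
    rw [pv_any2]
    ac_rfl

-- core equality, generalized over the two extracted lists
theorem pv_core (locs pc : List String) :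
    (if locs.any (fun loc => ["chest"].contains loc) || pc.contains "cardiovascular" || pc.contains "respiratory" then
      "Based on your chest/respiratory symptoms and medical guidelines, I recommend uploading a chest X-ray for comprehensive analysis."
    else if locs.any (fun loc => ["head"].contains loc) || pc.contains "neurological" then
      "Based on your neurological symptoms and clinical guidelines, I recommend uploading a brain MRI or CT scan for analysis."
    else if locs.any (fun loc => ["abdomen"].contains loc) || pc.contains "gastrointestinal" then
      "Based on your abdominal symptoms, I recommend uploading an abdominal CT scan or ultrasound for analysis."
    else if locs.any (fun loc => ["extremities", "back"].contains loc) then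
      "Based on your musculoskeletal symptoms, I recommend uploading an X-ray of the affected area for analysis."
    else
      "Based on your symptoms and medical guidelines, I recommend uploading relevant medical imaging for comprehensive diagnosis.") =
    pvMessages.getD
      (pvComplaintPriority.foldl (fun b kp => if pc.contains kp.1 then min b kp.2 else b)
        (locs.foldl (fun b loc => min b (pvLocPriority loc)) 4)) "" := by
  simp only [pvComplaintPriority, List.foldl_cons, List.foldl_nil,
    pv_foldl_min pvLocPriority _ _ (le_refl 4), pv_locmin_chain, pv_any_singleton, pv_any_pair]
  generalize locs.contains "chest" = c1
  generalize locs.contains "head" = c2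
  generalize locs.contains "abdomen" = c3
  generalize locs.contains "extremities" = c4
  generalize locs.contains "back" = c5
  generalize pc.contains "cardiovascular" = d1
  generalize pc.contains "respiratory" = d2
  generalize pc.contains "neurological" = d3
  generalize pc.contains "gastrointestinal" = d4
  revert c1 c2 c3 c4 c5 d1 d2 d3 d4
  set_option maxRecDepth 10000 in decide

-- ===== VERDICT =====
theorem get_imaging_recommendation_py_spec : Claim_equal_get_imaging_recommendation_py := by
  intro patient_data _
  unfold Spec_get_imaging_recommendation_py
  simp only [get_imaging_recommendation_py, get_imaging_recommendation_py_alt]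
  exact pv_core _ _
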